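-- pv_equiv track=rewrite | github.com/tgardela/project_euler_python | 046_goldbachs_other_conjecture.py | is_number_a_sum_of_prime_and_square
-- ===== SOURCE A (Python) =====
-- def is_number_a_sum_of_prime_and_square(number, primes):
--     flag = False
--     for prime in primes:
--         for to_square in range(1, 50):
--             result = prime + 2 * to_square ** 2
--             if result > number: break
--             if number == result:
--                 flag = True
--                 return flag
--     return flag
-- ===== SOURCE B (Python) =====
-- def is_number_a_sum_of_prime_and_square(number, primes):
--     for prime in primes:
--         diff = number - prime
--         if diff > 0 and diff % 2 == 0:
--             half = diff // 2
--             lo, hi = 1, 49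
--             while lo <= hi:
--                 mid = (lo + hi) // 2
--                 sq = mid * mid
--                 if sq == half:
--                     return True
--                 if sq < half:
--                     lo = mid + 1
--                 else:
--                     hi = mid - 1
--     return False
-- ===== Notes on version B (the rewrite author's own statement) =====
-- stated objective: alternative
-- what changed: Replaces the inner enumeration of the 49 candidate squares with a per-prime parity/positivity filter on diff = number - prime followed by a binary search for an integer square root of diff//2 in [1,49].
import Mathlib
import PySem

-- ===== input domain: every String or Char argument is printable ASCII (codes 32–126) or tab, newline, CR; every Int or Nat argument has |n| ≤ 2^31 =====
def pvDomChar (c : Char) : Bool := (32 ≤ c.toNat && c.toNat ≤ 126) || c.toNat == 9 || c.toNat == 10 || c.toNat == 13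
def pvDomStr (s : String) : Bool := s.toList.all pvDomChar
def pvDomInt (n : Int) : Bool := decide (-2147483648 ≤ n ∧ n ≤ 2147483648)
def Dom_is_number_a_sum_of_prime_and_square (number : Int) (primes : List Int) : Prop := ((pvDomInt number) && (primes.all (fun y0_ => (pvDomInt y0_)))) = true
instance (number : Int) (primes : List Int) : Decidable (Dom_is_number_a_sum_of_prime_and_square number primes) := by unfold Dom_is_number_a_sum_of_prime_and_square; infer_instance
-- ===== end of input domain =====

-- B filters diff = number - prime by positivity and parity, then binary-searches [1,49]
-- for an integer square root of diff // 2, instead of A's inner enumeration of candidate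
-- squares (objective: alternative).

-- ===== PORT A =====
-- inner 'for to_square in range(1, 50)' loop with break / early return
def pvInnerA (number prime : Int) : List Int → Bool
  | [] => false
  | t :: ts =>
    let result := prime + 2 * t ^ 2
    if result > number then false
    else if number == result then true
    else pvInnerA number prime ts

-- outer 'for prime in primes' loop with early 'return flag' on a hit
def pvOuterA (number : Int) : List Int → Bool
  | [] => false
  | p :: ps => if pvInnerA number p (PySem.List.pyRange 1 50 1) then true else pvOuterA number ps

def is_number_a_sum_of_prime_and_square (number : Int) (primes : List Int) : Bool :=
  pvOuterA number primes

-- ===== PORT B =====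
-- 'while lo <= hi' binary search for k with k*k == half
def pvBsearch (half lo hi : Int) : Bool :=
  if _h : lo ≤ hi then
    let mid := PySem.Int.floordiv (lo + hi) 2
    let sq := mid * mid
    if sq == half then true
    else if sq < half then pvBsearch half (mid + 1) hi
    else pvBsearch half lo (mid - 1)
  else false
termination_by (hi + 1 - lo).toNat
decreasing_by
  · have := PySem.Int.floordiv_two_mid_bounds _h; omega
  · have := PySem.Int.floordiv_two_mid_bounds _h; omega

-- 'for prime in primes' loop with the diff filter and early return
def pvOuterB (number : Int) : List Int → Bool
  | [] => false
  | p :: ps =>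
    let diff := number - p
    if diff > 0 && PySem.Int.mod diff 2 == 0 then
      if pvBsearch (PySem.Int.floordiv diff 2) 1 49 then true else pvOuterB number ps
    else pvOuterB number ps

def is_number_a_sum_of_prime_and_square_alt (number : Int) (primes : List Int) : Bool :=
  pvOuterB number primes

-- ===== PRECONDITION & SPEC =====
def Spec_is_number_a_sum_of_prime_and_square (number : Int) (primes : List Int) (out : Bool) : Prop := out = is_number_a_sum_of_prime_and_square_alt number primes
instance (number : Int) (primes : List Int) (out : Bool) : Decidable (Spec_is_number_a_sum_of_prime_and_square number primes out) := by unfold Spec_is_number_a_sum_of_prime_and_square; infer_instance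

-- ===== CLAIM (what is proved, stated in full; the proofs are below) =====
def Claim_equal_is_number_a_sum_of_prime_and_square : Prop := ∀ (number : Int) (primes : List Int), Dom_is_number_a_sum_of_prime_and_square number primes → Spec_is_number_a_sum_of_prime_and_square number primes (is_number_a_sum_of_prime_and_square number primes)

-- ===== LEMMAS AND PROOFS =====

-- A's inner loop with break finds a hit iff some candidate matches: the candidate list is
-- positive and nondecreasing, so everything after a break is even larger.
lemma pvInnerA_eq_any (n p : Int) (ks : List Int)
    (hpos : ∀ t ∈ ks, 1 ≤ t) (hs : ks.Pairwise (· ≤ ·)) :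
    pvInnerA n p ks = ks.any (fun t => n == p + 2 * t ^ 2) := by
  induction ks with
  | nil => rfl
  | cons t ts ih =>
    have ht : 1 ≤ t := hpos t (by simp)
    have hle : ∀ t' ∈ ts, t ≤ t' := fun t' h => (List.pairwise_cons.mp hs).1 t' h
    by_cases hbr : p + 2 * t ^ 2 > n
    · have hnone : ∀ t' ∈ t :: ts, ¬ (n = p + 2 * t' ^ 2) := by
        intro t' ht' heq
        rcases List.mem_cons.mp ht' with rfl | hmem
        · omega
        · have h1 : t ≤ t' := hle t' hmem
          have : t ^ 2 ≤ t' ^ 2 := by nlinarith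
          omega
      simp only [pvInnerA, if_pos hbr]
      symm
      simp only [List.any_eq_false, beq_iff_eq]
      intro t' ht'
      exact fun heq => hnone t' ht' heq
    · by_cases heq : n = p + 2 * t ^ 2
      · simp [pvInnerA, heq]
      · have := ih (fun t' h => hpos t' (by simp [h])) (List.pairwise_cons.mp hs).2
        simp [pvInnerA, if_neg hbr, heq, this]

-- binary search on the strictly increasing map k ↦ k*k over a nonnegative interval
lemma pvBsearch_iff (half lo hi : Int) :
    0 ≤ lo → (pvBsearch half lo hi = true ↔ ∃ k, lo ≤ k ∧ k ≤ hi ∧ k * k = half) := by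
  induction lo, hi using pvBsearch.induct half with
  | case1 lo hi h mid sq heq =>
    intro _
    have hbm : lo ≤ mid ∧ mid ≤ hi := PySem.Int.floordiv_two_mid_bounds h
    rw [pvBsearch, dif_pos h]
    show (if (mid * mid == half) = true then true
          else if mid * mid < half then pvBsearch half (mid + 1) hi
          else pvBsearch half lo (mid - 1)) = true ↔ _
    rw [if_pos heq]
    simp only [true_iff]
    exact ⟨mid, hbm.1, hbm.2, by simpa using heq⟩
  | case2 lo hi h mid sq hne hlt ih =>
    intro hlo
    have hbm : lo ≤ mid ∧ mid ≤ hi := PySem.Int.floordiv_two_mid_bounds h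
    rw [pvBsearch, dif_pos h]
    show (if (mid * mid == half) = true then true
          else if mid * mid < half then pvBsearch half (mid + 1) hi
          else pvBsearch half lo (mid - 1)) = true ↔ _
    rw [if_neg hne, if_pos hlt, ih (by omega)]
    constructor
    · rintro ⟨k, h1, h2, h3⟩; exact ⟨k, by omega, h2, h3⟩
    · rintro ⟨k, h1, h2, h3⟩
      refine ⟨k, ?_, h2, h3⟩
      by_contra hk
      have hkm : k ≤ mid := by omega
      have hk0 : 0 ≤ k := by omega
      have hsq : k * k ≤ mid * mid := by nlinarith
      have hlt' : mid * mid < half := hlt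
      omega
  | case3 lo hi h mid sq hne hge ih =>
    intro hlo
    have hbm : lo ≤ mid ∧ mid ≤ hi := PySem.Int.floordiv_two_mid_bounds h
    have hmid0 : 0 ≤ mid := by omega
    have hneq : ¬ (mid * mid = half) := by simpa using hne
    have hge' : ¬ (mid * mid < half) := hge
    have hgt : half < mid * mid := by omega
    rw [pvBsearch, dif_pos h]
    show (if (mid * mid == half) = true then true
          else if mid * mid < half then pvBsearch half (mid + 1) hi
          else pvBsearch half lo (mid - 1)) = true ↔ _
    rw [if_neg hne, if_neg hge, ih hlo]
    constructor
    · rintro ⟨k, h1, h2, h3⟩; exact ⟨k, h1, by omega, h3⟩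
    · rintro ⟨k, h1, h2, h3⟩
      refine ⟨k, h1, ?_, h3⟩
      by_contra hk
      have hkm : mid ≤ k := by omega
      have hsq : mid * mid ≤ k * k := by nlinarith
      omega
  | case4 lo hi h =>
    intro _
    rw [pvBsearch, dif_neg h]
    simp only [Bool.false_eq_true, false_iff]
    rintro ⟨k, h1, h2, _⟩; omega

-- B's per-prime test equals A's inner loop for that prime.
lemma perPrime_eq_inner (n p : Int) :
    (if n - p > 0 && PySem.Int.mod (n - p) 2 == 0 then
       pvBsearch (PySem.Int.floordiv (n - p) 2) 1 49
     else false)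
    = pvInnerA n p (PySem.List.pyRange 1 50 1) := by
  have hpos : ∀ t ∈ PySem.List.pyRange 1 50 1, (1 : Int) ≤ t := by
    intro t ht; exact (PySem.List.mem_pyRange_one.mp ht).1
  have hs : (PySem.List.pyRange 1 50 1).Pairwise (· ≤ ·) :=
    (PySem.List.pairwise_lt_pyRange_one 1 50).imp (fun h => le_of_lt h)
  rw [pvInnerA_eq_any n p _ hpos hs]
  have hdm := PySem.Int.floordiv_mul_add_mod (n - p) 2
  rw [Bool.eq_iff_iff]
  constructor
  · intro h
    by_cases hc : (n - p > 0 && PySem.Int.mod (n - p) 2 == 0) = true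
    · rw [if_pos hc] at h
      have hc' := hc
      simp only [Bool.and_eq_true, decide_eq_true_eq, beq_iff_eq] at hc'
      rcases ((pvBsearch_iff _ 1 49) (by omega)).mp h with ⟨k, hk1, hk49, hksq⟩
      rw [List.any_eq_true]
      refine ⟨k, PySem.List.mem_pyRange_one.mpr ⟨hk1, by omega⟩, ?_⟩
      rw [beq_iff_eq]; nlinarith [hc'.2, hdm, hksq]
    · rw [if_neg hc] at h; exact absurd h (by simp)
  · intro h
    rcases List.any_eq_true.mp h with ⟨k, hk, hkeq⟩
    rw [beq_iff_eq] at hkeq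
    rcases PySem.List.mem_pyRange_one.mp hk with ⟨hk1, hk50⟩
    have hdiff : n - p = 2 * (k * k) := by nlinarith [hkeq]
    have hmod : PySem.Int.mod (n - p) 2 = 0 :=
      (PySem.Int.mod_eq_zero_iff_dvd _ _).mpr ⟨k * k, hdiff⟩
    have hfd : PySem.Int.floordiv (n - p) 2 = k * k := by omega
    have hcond : (n - p > 0 && PySem.Int.mod (n - p) 2 == 0) = true := by
      simp only [Bool.and_eq_true, decide_eq_true_eq, beq_iff_eq]
      exact ⟨by nlinarith, hmod⟩
    rw [if_pos hcond]
    exact ((pvBsearch_iff _ 1 49) (by omega)).mpr ⟨k, hk1, by omega, by omega⟩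

-- both outer loops with early return are List.any of their per-prime test
lemma outer_eq (n : Int) (ps : List Int) : pvOuterA n ps = pvOuterB n ps := by
  induction ps with
  | nil => rfl
  | cons p ps ih =>
    have hpp := perPrime_eq_inner n p
    simp only [pvOuterA, pvOuterB, ← hpp]
    split_ifs with h1 h2 h3 <;> simp_all

-- ===== VERDICT (by name: the statement is the Claim_ definition above) =====
theorem is_number_a_sum_of_prime_and_square_spec : Claim_equal_is_number_a_sum_of_prime_and_square := by
  intro number primes _
  unfold Spec_is_number_a_sum_of_prime_and_square
  unfold is_number_a_sum_of_prime_and_square is_number_a_sum_of_prime_and_square_alt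
  exact outer_eq number primes
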